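-- pv_equiv track=rewrite | github.com/thesparkvision/AdventOfCode | 2023/day1/part2/main.py | check_if_number_word
-- ===== SOURCE A (Python) =====
-- number_words = {
--     "zero": '0',
--     "one": '1',
--     "two": '2',
--     "three": '3',
--     "four": '4',
--     "five": '5',
--     "six": '6',
--     "seven": '7',
--     "eight": '8',
--     "nine": '9'
-- }
--
-- def check_if_number_word(index, line):
--     ans = '-1'
--     for word, number in number_words.items():
--         word_slice = line[index: index + len(word)]
--         if word_slice == word:
--             ans = number
--             break
--     return ans
-- ===== SOURCE B (Python) =====
-- # Number words come only in lengths 3, 4 and 5, and none is a prefix of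
-- # another, so one lookup per length suffices -- no loop over words at all.
-- WORDS3 = {"one": '1', "two": '2', "six": '6'}
-- WORDS4 = {"zero": '0', "four": '4', "five": '5', "nine": '9'}
-- WORDS5 = {"three": '3', "seven": '7', "eight": '8'}
--
-- def check_if_number_word(index, line):
--     # every dict value is a non-empty string, so `or` == "first non-None"
--     return (WORDS3.get(line[index: index + 3])
--             or WORDS4.get(line[index: index + 4])
--             or WORDS5.get(line[index: index + 5])
--             or '-1')
-- ===== Notes on version B (the rewrite author's own statement) =====
-- stated objective: alternative
-- what changed: B removes A's ten-word slice-and-compare loop entirely: words are grouped into three per-length dicts (lengths 3, 4, 5, and no number word is a prefix of another), and B is a single loop-free chain of three slice lookups joined with 'or'.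
import Mathlib
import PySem

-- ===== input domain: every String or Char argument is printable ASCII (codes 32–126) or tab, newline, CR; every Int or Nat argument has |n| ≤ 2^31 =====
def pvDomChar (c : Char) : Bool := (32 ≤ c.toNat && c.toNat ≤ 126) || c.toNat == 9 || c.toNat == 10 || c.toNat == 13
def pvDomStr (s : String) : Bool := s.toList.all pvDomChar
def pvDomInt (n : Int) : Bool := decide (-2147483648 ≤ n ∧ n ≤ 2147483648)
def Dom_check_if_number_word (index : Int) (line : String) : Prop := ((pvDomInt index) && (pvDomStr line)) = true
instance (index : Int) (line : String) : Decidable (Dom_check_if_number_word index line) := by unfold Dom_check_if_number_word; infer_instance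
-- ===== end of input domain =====

-- B drops A's ten-word slice-and-compare loop: one dict lookup per word length (3,4,5), chained with `or`; alternative decomposition, same cost.

-- ===== PORT A =====
def pvNumberWords : PySem.Dict String String :=
  PySem.Dict.ofList [("zero","0"),("one","1"),("two","2"),("three","3"),("four","4"),
                     ("five","5"),("six","6"),("seven","7"),("eight","8"),("nine","9")]

-- the for-loop over number_words.items() with ans/break (break = return the found number)
def pvCheckLoop (index : Int) (line : String) : List (String × String) → String
  | [] => "-1"
  | (word, number) :: rest =>
      if PySem.Str.slice line (some index) (some (index + PySem.Str.len word)) = word then number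
      else pvCheckLoop index line rest

def check_if_number_word (index : Int) (line : String) : String :=
  pvCheckLoop index line pvNumberWords.items

-- ===== PORT B =====
def pvWords3 : PySem.Dict String String := PySem.Dict.ofList [("one","1"),("two","2"),("six","6")]
def pvWords4 : PySem.Dict String String := PySem.Dict.ofList [("zero","0"),("four","4"),("five","5"),("nine","9")]
def pvWords5 : PySem.Dict String String := PySem.Dict.ofList [("three","3"),("seven","7"),("eight","8")]

-- Source B's `get(..) or get(..) or get(..) or '-1'`; every dict value is a
-- non-empty (truthy) string, so Python's `or` is exactly Option.orElse/getD
def check_if_number_word_alt (index : Int) (line : String) : String :=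
  Option.getD
    (Option.orElse (pvWords3.get? (PySem.Str.slice line (some index) (some (index + 3))))
      (fun _ => Option.orElse (pvWords4.get? (PySem.Str.slice line (some index) (some (index + 4))))
        (fun _ => pvWords5.get? (PySem.Str.slice line (some index) (some (index + 5))))))
    "-1"

-- ===== PRECONDITION & SPEC =====
def Spec_check_if_number_word (index : Int) (line : String) (out : String) : Prop := out = check_if_number_word_alt index line
instance (index : Int) (line : String) (out : String) : Decidable (Spec_check_if_number_word index line out) := by unfold Spec_check_if_number_word; infer_instance

-- ===== CLAIM (what is proved, stated in full; the proofs are below) =====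
def Claim_equal_check_if_number_word : Prop := ∀ (index : Int) (line : String), Dom_check_if_number_word index line → Spec_check_if_number_word index line (check_if_number_word index line)

-- ===== LEMMAS AND PROOFS =====

lemma pvGet?_mk_nil {ν : Type} (x : String) : (PySem.Dict.mk ([] : List (String × ν))).get? x = none := by
  simp [PySem.Dict.get?]

-- two Python slices of the same list with the same start are takes of the same suffix,
-- hence always comparable under the prefix order
lemma pvSlice_comparable (xs : List Char) (a b1 b2 : Int) :
    PySem.List.slice xs (some a) (some b1) <+: PySem.List.slice xs (some a) (some b2) ∨
    PySem.List.slice xs (some a) (some b2) <+: PySem.List.slice xs (some a) (some b1) := by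
  simp only [PySem.List.slice]
  rcases Nat.le_total
      (PySem.List.clampIdx xs.length b1 - PySem.List.clampIdx xs.length a)
      (PySem.List.clampIdx xs.length b2 - PySem.List.clampIdx xs.length a) with h | h
  · left
    rw [show PySem.List.clampIdx xs.length b1 - PySem.List.clampIdx xs.length a
        = min (PySem.List.clampIdx xs.length b1 - PySem.List.clampIdx xs.length a)
          (PySem.List.clampIdx xs.length b2 - PySem.List.clampIdx xs.length a) from (Nat.min_eq_left h).symm,
      ← List.take_take]
    exact List.take_prefix _ _
  · right
    rw [show PySem.List.clampIdx xs.length b2 - PySem.List.clampIdx xs.length a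
        = min (PySem.List.clampIdx xs.length b2 - PySem.List.clampIdx xs.length a)
          (PySem.List.clampIdx xs.length b1 - PySem.List.clampIdx xs.length a) from (Nat.min_eq_left h).symm,
      ← List.take_take]
    exact List.take_prefix _ _

lemma pvStrSlice_comparable (line : String) (a b1 b2 : Int) :
    (PySem.Str.slice line (some a) (some b1)).toList <+: (PySem.Str.slice line (some a) (some b2)).toList ∨
    (PySem.Str.slice line (some a) (some b2)).toList <+: (PySem.Str.slice line (some a) (some b1)).toList := by
  simp only [PySem.Str.toList_slice, PySem.Chars.slice_eq_listSlice]
  exact pvSlice_comparable line.toList a b1 b2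

-- at most one number word can match at a given index: the three slices are pairwise
-- prefix-comparable and no number word is a prefix of another
set_option maxHeartbeats 4000000 in
set_option maxRecDepth 8192 in
lemma pvKey (s3 s4 s5 : String)
    (h34 : s3.toList <+: s4.toList ∨ s4.toList <+: s3.toList)
    (h35 : s3.toList <+: s5.toList ∨ s5.toList <+: s3.toList)
    (h45 : s4.toList <+: s5.toList ∨ s5.toList <+: s4.toList) :
    (if s4 = "zero" then "0" else if s3 = "one" then "1" else if s3 = "two" then "2"
     else if s5 = "three" then "3" else if s4 = "four" then "4" else if s4 = "five" then "5"
     else if s3 = "six" then "6" else if s5 = "seven" then "7" else if s5 = "eight" then "8"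
     else if s4 = "nine" then "9" else "-1")
    =
    Option.getD
      (Option.orElse ((PySem.Dict.mk [("one","1"),("two","2"),("six","6")] : PySem.Dict String String).get? s3)
        (fun _ => Option.orElse ((PySem.Dict.mk [("zero","0"),("four","4"),("five","5"),("nine","9")] : PySem.Dict String String).get? s4)
          (fun _ => (PySem.Dict.mk [("three","3"),("seven","7"),("eight","8")] : PySem.Dict String String).get? s5)))
      "-1" := by
  simp only [PySem.Dict.get?_mk_cons, beq_iff_eq, pvGet?_mk_nil]
  split_ifs <;>
    first
      | rfl
      | (subst_vars; rcases h34 with h | h <;> exact absurd h (by decide))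
      | (subst_vars; rcases h35 with h | h <;> exact absurd h (by decide))
      | (subst_vars; rcases h45 with h | h <;> exact absurd h (by decide))
      | (subst_vars; simp_all)

-- ===== VERDICT (by name: the statement is the Claim_ definition above) =====
set_option maxHeartbeats 4000000 in
set_option maxRecDepth 8192 in
theorem check_if_number_word_spec : Claim_equal_check_if_number_word := by
  intro index line _
  unfold Spec_check_if_number_word
  have hA : pvNumberWords.items =
      [("zero","0"),("one","1"),("two","2"),("three","3"),("four","4"),
       ("five","5"),("six","6"),("seven","7"),("eight","8"),("nine","9")] := rfl
  have h3 : pvWords3 = PySem.Dict.mk [("one","1"),("two","2"),("six","6")] := rfl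
  have h4 : pvWords4 = PySem.Dict.mk [("zero","0"),("four","4"),("five","5"),("nine","9")] := rfl
  have h5 : pvWords5 = PySem.Dict.mk [("three","3"),("seven","7"),("eight","8")] := rfl
  rw [check_if_number_word, check_if_number_word_alt, hA, h3, h4, h5]
  clear hA h3 h4 h5
  simp only [pvCheckLoop,
    show PySem.Str.len "zero" = 4 from rfl, show PySem.Str.len "one" = 3 from rfl,
    show PySem.Str.len "two" = 3 from rfl, show PySem.Str.len "three" = 5 from rfl,
    show PySem.Str.len "four" = 4 from rfl, show PySem.Str.len "five" = 4 from rfl,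
    show PySem.Str.len "six" = 3 from rfl, show PySem.Str.len "seven" = 5 from rfl,
    show PySem.Str.len "eight" = 5 from rfl, show PySem.Str.len "nine" = 4 from rfl]
  exact pvKey _ _ _
    (pvStrSlice_comparable line index (index + 3) (index + 4))
    (pvStrSlice_comparable line index (index + 3) (index + 5))
    (pvStrSlice_comparable line index (index + 4) (index + 5))
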